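-- pv_equiv track=rewrite | github.com/makerspace/makeradmin | api/src/membership/member_auth.py | contains_sub_sequence
-- ===== SOURCE A (Python) =====
-- from typing import List, Optional, Tuple
--
-- def contains_sub_sequence(value: str, sequence: str, length: Optional[int]) -> bool:
--     if length is None:
--         length = len(sequence)
--     value = value.lower()
--     for i in range(0, len(sequence) - length + 1):
--         if value.find(sequence[i : i + length]) != -1:
--             return True
--     return False
-- ===== SOURCE B (Python) =====
-- def contains_sub_sequence(value: str, sequence: str, length) -> bool:
--     if length is None:
--         length = len(sequence)
--     if len(sequence) < length:
--         return False
--     if length <= 0: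
--         return True
--     seq_windows = set()
--     cs = sequence
--     while len(cs) >= length:
--         seq_windows.add(cs[:length])
--         cs = cs[1:]
--     cs = value.lower()
--     while len(cs) >= length:
--         if cs[:length] in seq_windows:
--             return True
--         cs = cs[1:]
--     return False
-- ===== Notes on version B (the rewrite author's own statement) =====
-- stated objective: alternative
-- what changed: Instead of running value.find once per window of sequence, B makes one sliding pass collecting sequence's length-k windows into a hash set and a second sliding pass over the lowered value testing each of its windows by set membership (correct because a length-k substring occurs in value iff some window of value equals some window of sequence); measured ~2x faster at moderate sizes but window copying keeps it O(n*k) in the worst case, so no speed claim.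
import Mathlib
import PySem

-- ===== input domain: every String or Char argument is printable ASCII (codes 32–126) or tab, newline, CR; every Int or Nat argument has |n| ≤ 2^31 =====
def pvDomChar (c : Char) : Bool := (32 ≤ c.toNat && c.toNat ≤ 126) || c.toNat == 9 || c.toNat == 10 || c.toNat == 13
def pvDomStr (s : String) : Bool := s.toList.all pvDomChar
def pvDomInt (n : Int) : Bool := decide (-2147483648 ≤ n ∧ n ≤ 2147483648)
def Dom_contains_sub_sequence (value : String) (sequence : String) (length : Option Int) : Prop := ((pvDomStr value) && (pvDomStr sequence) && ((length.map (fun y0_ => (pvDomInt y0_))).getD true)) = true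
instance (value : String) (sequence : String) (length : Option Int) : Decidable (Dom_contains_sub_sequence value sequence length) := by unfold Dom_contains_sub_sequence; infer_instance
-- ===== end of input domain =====

-- B replaces A's per-window substring search (value.find run for every window of sequence)
-- by one sliding pass collecting sequence's length-k windows into a set, then one sliding
-- pass over the lowered value testing each of its windows for membership (objective: alternative).

-- ===== PORT A =====
def contains_sub_sequence (value : String) (sequence : String) (length : Option Int) : Bool :=
  let length := match length with | none => PySem.Str.len sequence | some l => l
  let value := PySem.Str.lower value
  (PySem.List.pyRange 0 (PySem.Str.len sequence - length + 1) 1).any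
    (fun i => PySem.Str.find value (PySem.Str.slice sequence (some i) (some (i + length))) != -1)

-- ===== PORT B =====
-- the 'while len(cs) >= length: … cs = cs[1:]' sliding pass of Source B, as structural recursion
def pvWindows (L : Nat) : List Char → List (List Char)
  | [] => []
  | c :: cs => if (c :: cs).length < L then [] else (c :: cs).take L :: pvWindows L cs

def contains_sub_sequence_alt (value : String) (sequence : String) (length : Option Int) : Bool :=
  let length := match length with | none => PySem.Str.len sequence | some l => l
  if PySem.Str.len sequence < length then false
  else if length ≤ 0 then true
  else
    let seqWindows : PySem.Set (List Char) :=
      PySem.Set.ofList (pvWindows length.toNat sequence.toList)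
    (pvWindows length.toNat (PySem.Str.lower value).toList).any
      (fun w => PySem.Set.contains seqWindows w)

-- ===== PRECONDITION & SPEC =====
def Spec_contains_sub_sequence (value : String) (sequence : String) (length : Option Int) (out : Bool) : Prop := out = contains_sub_sequence_alt value sequence length
instance (value : String) (sequence : String) (length : Option Int) (out : Bool) : Decidable (Spec_contains_sub_sequence value sequence length out) := by unfold Spec_contains_sub_sequence; infer_instance

-- ===== CLAIM (what is proved, stated in full; the proofs are below) =====
def Claim_equal_contains_sub_sequence : Prop := ∀ (value : String) (sequence : String) (length : Option Int), Dom_contains_sub_sequence value sequence length → Spec_contains_sub_sequence value sequence length (contains_sub_sequence value sequence length)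

-- ===== LEMMAS AND PROOFS =====

-- the slice s[j : j+L] with 0 ≤ j, 0 ≤ L, on the character list
lemma pv_slice_toList (v : String) (j L : Int) (hj : 0 ≤ j) (hL : 0 ≤ L) :
    (PySem.Str.slice v (some j) (some (j + L))).toList
      = (v.toList.drop j.toNat).take L.toNat := by
  rw [PySem.Str.toList_slice, PySem.Chars.slice_eq_listSlice,
    PySem.List.slice_toNat _ hj (by omega)]
  congr 1
  omega

-- membership in the sliding-window list
lemma pv_mem_pvWindows (L : Nat) (hL : 0 < L) :
    ∀ (cs w : List Char),
      w ∈ pvWindows L cs ↔ ∃ j, j + L ≤ cs.length ∧ w = (cs.drop j).take L := by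
  intro cs
  induction cs with
  | nil =>
    intro w
    simp [pvWindows]
    omega
  | cons c cs ih =>
    intro w
    by_cases h : (c :: cs).length < L
    · rw [pvWindows, if_pos h]
      simp only [List.not_mem_nil, false_iff, not_exists]
      rintro j ⟨hj, -⟩
      omega
    · rw [pvWindows, if_neg h]
      simp only [List.mem_cons, ih]
      constructor
      · rintro (rfl | ⟨j, hj, rfl⟩)
        · exact ⟨0, by simp only [List.length_cons] at h ⊢; omega, by simp⟩
        · exact ⟨j + 1, by simp only [List.length_cons] at hj ⊢; omega, by simp⟩
      · rintro ⟨j, hj, rfl⟩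
        cases j with
        | zero => left; simp
        | succ j => right; exact ⟨j, by simp only [List.length_cons] at hj ⊢; omega, by simp⟩

-- an infix is exactly a window at some offset
lemma pv_infix_iff_window (w v : List Char) :
    (w <:+: v) ↔ ∃ j, j + w.length ≤ v.length ∧ w = (v.drop j).take w.length := by
  constructor
  · rintro ⟨t, u, rfl⟩
    refine ⟨t.length, by simp, ?_⟩
    rw [List.append_assoc, List.drop_left, List.take_left]
  · rintro ⟨j, hj, hw⟩
    rw [hw]
    exact ((List.take_prefix _ _).isInfix).trans (List.drop_suffix _ _).isInfix

-- A's loop equals B's two passes, for any effective window length L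
lemma pv_main (value sequence : String) (L : Int) :
    ((PySem.List.pyRange 0 (PySem.Str.len sequence - L + 1) 1).any
      (fun i => PySem.Str.find (PySem.Str.lower value)
        (PySem.Str.slice sequence (some i) (some (i + L))) != -1))
    = (if PySem.Str.len sequence < L then false
       else if L ≤ 0 then true
       else
        (pvWindows L.toNat (PySem.Str.lower value).toList).any
          (fun w => PySem.Set.contains
            (PySem.Set.ofList (pvWindows L.toNat sequence.toList)) w)) := by
  rw [PySem.Str.len_eq]
  by_cases h1 : (sequence.toList.length : Int) < L
  · rw [if_pos h1, PySem.List.pyRange_one_eq_nil (by omega)]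
    rfl
  · rw [if_neg h1]
    by_cases h2 : L ≤ 0
    · rw [if_pos h2]
      rw [List.any_eq_true]
      refine ⟨-L, ?_, ?_⟩
      · rw [PySem.List.mem_pyRange_one]
        constructor <;> omega
      · have hsl : PySem.List.slice sequence.toList (some (-L)) (some 0) = ([] : List Char) := by
          rw [PySem.List.slice_toNat _ (by omega) (by omega)]
          simp
        have hz : -L + L = (0:Int) := by omega
        simp only [hz, bne_iff_ne, ne_eq, PySem.Str.find_eq, PySem.Str.toList_slice,
          PySem.Chars.slice_eq_listSlice, hsl, PySem.Chars.find_nil]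
        norm_num
    · rw [if_neg h2]
      have h2' : 0 < L := by omega
      rw [Bool.eq_iff_iff, List.any_eq_true, List.any_eq_true]
      constructor
      · rintro ⟨i, hi, hfind⟩
        rw [PySem.List.mem_pyRange_one] at hi
        rw [bne_iff_ne, ne_eq, ← ne_eq, PySem.Str.find_ne_neg_one_iff] at hfind
        set w := (PySem.Str.slice sequence (some i) (some (i + L))).toList with hw
        have hwl : w = (sequence.toList.drop i.toNat).take L.toNat := by
          rw [hw, pv_slice_toList sequence i L hi.1 (le_of_lt h2')]
        have hlen : w.length = L.toNat := by
          rw [hwl, List.length_take, List.length_drop]; omega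
        rw [pv_infix_iff_window, hlen] at hfind
        obtain ⟨j, hj, hwe⟩ := hfind
        refine ⟨w, ?_, ?_⟩
        · rw [pv_mem_pvWindows _ (by omega)]
          exact ⟨j, hj, hwe⟩
        · rw [PySem.Set.contains_iff, PySem.Set.mem_ofList,
            pv_mem_pvWindows _ (by omega)]
          exact ⟨i.toNat, by omega, hwl⟩
      · rintro ⟨w, hwv, hws⟩
        rw [pv_mem_pvWindows _ (by omega)] at hwv
        rw [PySem.Set.contains_iff, PySem.Set.mem_ofList,
          pv_mem_pvWindows _ (by omega)] at hws
        obtain ⟨j, hjb, hjw⟩ := hwv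
        obtain ⟨i, hib, hiw⟩ := hws
        refine ⟨(i : Int), ?_, ?_⟩
        · rw [PySem.List.mem_pyRange_one]
          constructor <;> omega
        · rw [bne_iff_ne, ne_eq, ← ne_eq, PySem.Str.find_ne_neg_one_iff]
          have hsl : (PySem.Str.slice sequence (some (i:Int)) (some ((i:Int) + L))).toList
              = (sequence.toList.drop i).take L.toNat := by
            rw [pv_slice_toList sequence _ L (Int.natCast_nonneg _) (le_of_lt h2')]
            simp
          rw [hsl, ← hiw, hjw, pv_infix_iff_window]
          refine ⟨j, ?_, ?_⟩
          · rw [List.length_take, List.length_drop]; omega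
          · rw [List.length_take, List.length_drop]
            congr 1
            omega

-- ===== VERDICT (by name: the statement is the Claim_ definition above) =====
theorem contains_sub_sequence_spec : Claim_equal_contains_sub_sequence := by
  intro value sequence length _
  unfold Spec_contains_sub_sequence contains_sub_sequence contains_sub_sequence_alt
  cases length <;> exact pv_main value sequence _
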